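-- pv_equiv track=rewrite | github.com/imranblr/CodeWars | CountSolutes.py | count_salutes
-- ===== SOURCE A (Python) =====
-- def count_salutes(hallway):
--     _list = list(hallway)
--     count = 0
--     while _list:
--         ludo = _list[0]
--         if ludo == '>':
--             for x in _list:
--                 if x == '<': count += 2
--         _list.remove(ludo)
--     return count
-- ===== SOURCE B (Python) =====
-- def count_salutes(hallway):
--     count = 0
--     gt = 0
--     for c in hallway:
--         if c == '>':
--             gt += 1
--         elif c == '<':
--             count += 2 * gt
--     return count
-- ===== Notes on version B (the rewrite author's own statement) =====
-- stated objective: faster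
-- what changed: Replaced the quadratic destructive while-loop that re-scans the whole remaining list at each right-facing person with a single left-to-right pass that keeps a running count of right-facing people seen and adds twice that count for each left-facing person.
import Mathlib
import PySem

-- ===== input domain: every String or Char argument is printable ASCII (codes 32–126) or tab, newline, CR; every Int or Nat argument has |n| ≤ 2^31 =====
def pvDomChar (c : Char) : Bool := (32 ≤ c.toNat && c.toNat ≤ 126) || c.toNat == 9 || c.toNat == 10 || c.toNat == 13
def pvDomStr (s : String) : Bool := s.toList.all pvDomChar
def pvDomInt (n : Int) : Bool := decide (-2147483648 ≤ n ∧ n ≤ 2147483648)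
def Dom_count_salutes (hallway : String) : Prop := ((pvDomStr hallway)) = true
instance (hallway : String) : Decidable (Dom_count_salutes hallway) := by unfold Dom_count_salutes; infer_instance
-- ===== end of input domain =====

-- B replaces A's quadratic destructive while-loop with one left-to-right pass; return values proved equal.

-- ===== PORT A =====
-- inner 'for x in _list: if x == '<': count += 2'
def csInner (l : List Char) (count : Int) : Int :=
  l.foldl (fun c x => if x = '<' then c + 2 else c) count

-- 'while _list: ludo = _list[0]; if ludo == '>': …; _list.remove(ludo)'
-- (_list.remove(_list[0]) removes exactly the head, so the loop consumes the list front to back)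
def csLoop : List Char → Int → Int
  | [], count => count
  | h :: t, count => csLoop t (if h = '>' then csInner (h :: t) count else count)

def count_salutes (hallway : String) : Int :=
  csLoop hallway.toList 0

-- ===== PORT B =====
def csStep (s : Int × Int) (c : Char) : Int × Int :=
  if c = '>' then (s.1, s.2 + 1)
  else if c = '<' then (s.1 + 2 * s.2, s.2)
  else s

def count_salutes_alt (hallway : String) : Int :=
  (hallway.toList.foldl csStep (0, 0)).1

-- ===== PRECONDITION & SPEC =====
def Spec_count_salutes (hallway : String) (out : Int) : Prop := out = count_salutes_alt hallway
instance (hallway : String) (out : Int) : Decidable (Spec_count_salutes hallway out) := by unfold Spec_count_salutes; infer_instance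

-- ===== CLAIM (what is proved, stated in full; the proofs are below) =====
def Claim_equal_count_salutes : Prop := ∀ (hallway : String), Dom_count_salutes hallway → Spec_count_salutes hallway (count_salutes hallway)

-- ===== LEMMAS AND PROOFS =====

theorem csInner_add : ∀ (l : List Char) (c k : Int), csInner l (c + k) = csInner l c + k := by
  intro l
  induction l with
  | nil => intro c k; rfl
  | cons h t ih =>
    intro c k
    simp only [csInner, List.foldl] at *
    by_cases hh : h = '<' <;> simp [hh]
    · have := ih (c + 2) k
      calc List.foldl (fun c x => if x = '<' then c + 2 else c) (c + k + 2) t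
          = List.foldl (fun c x => if x = '<' then c + 2 else c) (c + 2 + k) t := by ring_nf
        _ = _ := ih (c + 2) k
    · exact ih c k

theorem csLoop_add : ∀ (l : List Char) (c k : Int), csLoop l (c + k) = csLoop l c + k := by
  intro l
  induction l with
  | nil => intro c k; rfl
  | cons h t ih =>
    intro c k
    by_cases hh : h = '>' <;> simp only [csLoop, hh, if_pos, if_neg, if_true, if_false]
    · rw [csInner_add, ih]
    · exact ih c k

theorem csInner_cons (h : Char) (t : List Char) (c : Int) :
    csInner (h :: t) c = csInner t (if h = '<' then c + 2 else c) := rfl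

theorem fold_eq : ∀ (l : List Char) (c g : Int),
    (List.foldl csStep (c, g) l).1 = csLoop l c + g * csInner l 0 := by
  intro l
  induction l with
  | nil => intro c g; simp [csLoop, csInner]
  | cons h t ih =>
    intro c g
    have hstep : List.foldl csStep (c, g) (h :: t) = List.foldl csStep (csStep (c, g) h) t := rfl
    by_cases hgt : h = '>'
    · have hlt : ¬ h = '<' := by rw [hgt]; decide
      rw [hstep]
      have h1 : csStep (c, g) h = (c, g + 1) := by simp [csStep, hgt, hlt]
      rw [h1, ih, csLoop, if_pos hgt, csInner_cons, if_neg hlt, csInner_cons, if_neg hlt]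
      have h2 : csInner t c = c + csInner t 0 := by
        have := csInner_add t 0 c; simpa [add_comm] using this
      rw [h2, csLoop_add]
      ring
    · by_cases hlt : h = '<'
      · rw [hstep]
        have h1 : csStep (c, g) h = (c + 2 * g, g) := by simp [csStep, hgt, hlt]
        rw [h1, ih, csLoop, if_neg hgt, csInner_cons, if_pos hlt]
        have h2 : csInner t 2 = csInner t 0 + 2 := by
          have := csInner_add t 0 2; simpa using this
        simp only [zero_add]
        rw [csLoop_add, h2]
        ring
      · rw [hstep]
        have h1 : csStep (c, g) h = (c, g) := by simp [csStep, hgt, hlt]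
        rw [h1, ih, csLoop, if_neg hgt, csInner_cons, if_neg hlt]

-- ===== VERDICT (by name: the statement is the Claim_ definition above) =====
theorem count_salutes_spec : Claim_equal_count_salutes := by
  intro hallway _
  unfold Spec_count_salutes count_salutes count_salutes_alt
  rw [fold_eq]
  ring
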